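-- pv_equiv track=rewrite | github.com/sumtopmus/mafia-seating-bot | src/metrics.py | pairsHistogramRange
-- ===== SOURCE A (Python) =====
-- def pairsHistogramRange(pairs : dict):
--     beg = None
--     for idx in sorted(pairs):
--         if beg == None and pairs[idx] > 0:
--             beg = idx
--
--     end = None
--     for idx in reversed(sorted(pairs)):
--         if end == None and pairs[idx] > 0:
--             end = idx
--     return beg, end
-- ===== SOURCE B (Python) =====
-- def pairsHistogramRange(pairs : dict):
--     beg = None
--     end = None
--     for k, v in pairs.items():
--         if v > 0:
--             beg = k if beg is None else min(beg, k)
--             end = k if end is None else max(end, k)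
--     return beg, end
-- ===== Notes on version B (the rewrite author's own statement) =====
-- stated objective: faster
-- what changed: Replaces the two sorted-key scans (each over sorted(pairs)) by a single unsorted pass over pairs.items() that tracks the min and max key with positive value.
import Mathlib
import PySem

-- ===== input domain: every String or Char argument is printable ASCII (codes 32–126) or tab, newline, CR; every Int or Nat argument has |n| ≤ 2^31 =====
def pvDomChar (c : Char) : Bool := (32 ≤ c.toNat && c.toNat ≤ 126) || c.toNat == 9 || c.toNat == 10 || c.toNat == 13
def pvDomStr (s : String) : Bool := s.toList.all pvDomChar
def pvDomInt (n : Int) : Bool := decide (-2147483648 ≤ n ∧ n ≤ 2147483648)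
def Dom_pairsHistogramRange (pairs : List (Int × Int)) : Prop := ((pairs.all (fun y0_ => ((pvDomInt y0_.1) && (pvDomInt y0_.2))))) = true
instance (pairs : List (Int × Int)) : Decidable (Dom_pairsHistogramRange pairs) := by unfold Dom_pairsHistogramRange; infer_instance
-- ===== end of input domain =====

-- B replaces A's two scans of the sorted key list by one unsorted pass over the items
-- tracking the min and max key with positive value (objective: faster, O(n) vs O(n log n)).

-- ===== PORT A =====
-- pairs[idx] with idx a key of the dict: get? is some, so getD with default 0 is exact.
def pairsHistogramRange (pairs : List (Int × Int)) : Option Int × Option Int :=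
  let d := PySem.Dict.ofList pairs
  let s := PySem.List.sorted d.keys (fun x => x) false
  let beg := s.foldl (fun beg idx => if beg = none ∧ 0 < d.getD idx 0 then some idx else beg) none
  let e := s.reverse.foldl (fun e idx => if e = none ∧ 0 < d.getD idx 0 then some idx else e) none
  (beg, e)

-- ===== PORT B =====
def pvBStep (acc : Option Int × Option Int) (kv : Int × Int) : Option Int × Option Int :=
  if 0 < kv.2 then
    ((match acc.1 with | none => some kv.1 | some b => some (min b kv.1)),
     (match acc.2 with | none => some kv.1 | some e => some (max e kv.1)))
  else acc

def pairsHistogramRange_alt (pairs : List (Int × Int)) : Option Int × Option Int :=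
  (PySem.Dict.ofList pairs).items.foldl pvBStep (none, none)

-- ===== PRECONDITION & SPEC =====
def Spec_pairsHistogramRange (pairs : List (Int × Int)) (out : Option Int × Option Int) : Prop := out = pairsHistogramRange_alt pairs
instance (pairs : List (Int × Int)) (out : Option Int × Option Int) : Decidable (Spec_pairsHistogramRange pairs out) := by unfold Spec_pairsHistogramRange; infer_instance

-- ===== CLAIM (what is proved, stated in full; the proofs are below) =====
def Claim_equal_pairsHistogramRange : Prop := ∀ (pairs : List (Int × Int)), Dom_pairsHistogramRange pairs → Spec_pairsHistogramRange pairs (pairsHistogramRange pairs)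

-- ===== LEMMAS AND PROOFS =====

-- A's loop shape: keep the first key satisfying the test.
theorem pvFirst_some (q : Int → Prop) [DecidablePred q] (l : List Int) (y : Int) :
    l.foldl (fun b x => if b = none ∧ q x then some x else b) (some y) = some y := by
  induction l with
  | nil => rfl
  | cons x t ih => simpa using ih

theorem pvFirst_eq_head_filter (q : Int → Prop) [DecidablePred q] (l : List Int) :
    l.foldl (fun b x => if b = none ∧ q x then some x else b) none
      = (l.filter (fun x => decide (q x))).head? := by
  induction l with
  | nil => rfl
  | cons x t ih =>
    by_cases h : q x
    · simp [List.foldl_cons, h, pvFirst_some]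
    · simp [List.foldl_cons, h, ih]

def pvOptMin (b : Option Int) (x : Int) : Option Int :=
  match b with | none => some x | some y => some (min y x)
def pvOptMax (b : Option Int) (x : Int) : Option Int :=
  match b with | none => some x | some y => some (max y x)

theorem pvBfold (l : List (Int × Int)) (acc : Option Int × Option Int) :
    l.foldl pvBStep acc =
      (((l.filter (fun kv => 0 < kv.2)).map (·.1)).foldl pvOptMin acc.1,
       ((l.filter (fun kv => 0 < kv.2)).map (·.1)).foldl pvOptMax acc.2) := by
  induction l generalizing acc with
  | nil => rfl
  | cons kv t ih =>
    by_cases h : 0 < kv.2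
    · simp [List.foldl_cons, pvBStep, h, ih, pvOptMin, pvOptMax]
    · simp [List.foldl_cons, pvBStep, h, ih]

theorem pvOptMin_fold_eq_min? (l : List Int) : l.foldl pvOptMin none = l.min? := by
  cases l with
  | nil => rfl
  | cons x t =>
    show t.foldl pvOptMin (some x) = some (t.foldl min x)
    induction t generalizing x with
    | nil => rfl
    | cons y s ih => simp [List.foldl_cons, pvOptMin, ih]

theorem pvOptMax_fold_eq_max? (l : List Int) : l.foldl pvOptMax none = l.max? := by
  cases l with
  | nil => rfl
  | cons x t =>
    show t.foldl pvOptMax (some x) = some (t.foldl max x)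
    induction t generalizing x with
    | nil => rfl
    | cons y s ih => simp [List.foldl_cons, pvOptMax, ih]

-- head? of a strictly increasing list is its min?, under any permutation.
theorem pvHead_eq_min? (f t : List Int) (hperm : t.Perm f) (hp : f.Pairwise (· < ·)) :
    f.head? = t.min? := by
  cases f with
  | nil => simp [List.Perm.eq_nil (by simpa using hperm)]
  | cons h rest =>
    have hmem : h ∈ t := hperm.mem_iff.mpr (by simp)
    have hle : ∀ b ∈ t, h ≤ b := by
      intro b hb
      rcases List.mem_cons.mp (hperm.mem_iff.mp hb) with hb' | hb'
      · omega
      · exact le_of_lt ((List.pairwise_cons.mp hp).1 b hb')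
    exact ((List.min?_eq_some_iff).mpr ⟨hmem, hle⟩).symm

theorem pvLast_eq_max? (f t : List Int) (hperm : t.Perm f) (hp : f.Pairwise (· < ·)) :
    f.getLast? = t.max? := by
  rw [← List.head?_reverse]
  cases hr : f.reverse with
  | nil =>
    have : f = [] := by simpa using congrArg List.reverse hr
    simp [List.Perm.eq_nil (by simpa [this] using hperm)]
  | cons h rest =>
    have hpr : f.reverse.Pairwise (· > ·) := by
      simpa using hp.reverse
    rw [hr] at hpr
    have hpermr : t.Perm f.reverse := hperm.trans f.reverse_perm.symm
    rw [hr] at hpermr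
    have hmem : h ∈ t := hpermr.mem_iff.mpr (by simp)
    have hle : ∀ b ∈ t, b ≤ h := by
      intro b hb
      rcases List.mem_cons.mp (hpermr.mem_iff.mp hb) with hb' | hb'
      · omega
      · exact le_of_lt ((List.pairwise_cons.mp hpr).1 b hb')
    exact ((List.max?_eq_some_iff).mpr ⟨hmem, hle⟩).symm

theorem pvMain (pairs : List (Int × Int)) :
    pairsHistogramRange pairs = pairsHistogramRange_alt pairs := by
  unfold pairsHistogramRange pairsHistogramRange_alt
  dsimp only
  set d := PySem.Dict.ofList pairs with hd
  set s := PySem.List.sorted d.keys (fun x => x) false with hs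
  have hnd : d.keys.Nodup := PySem.Dict.nodup_keys_ofList pairs
  -- s is strictly increasing
  have hsnd : s.Nodup := ((PySem.List.sorted_perm d.keys (fun x => x) false).nodup_iff).mpr hnd
  have hslt : s.Pairwise (· < ·) := by
    have h1 : s.Pairwise (· ≤ ·) := by
      simpa using PySem.List.sorted_pairwise d.keys (fun x => x)
    exact (List.pairwise_and_iff.mpr ⟨hsnd, h1⟩).imp (fun h => lt_of_le_of_ne h.2 h.1)
  -- the filtered sorted keys vs the filtered items
  set p : Int → Bool := fun k => decide (0 < d.getD k 0) with hpdef
  set F := s.filter p with hF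
  set T := (d.items.filter (fun kv => 0 < kv.2)).map (·.1) with hT
  have hFlt : F.Pairwise (· < ·) := hslt.filter p
  have hperm : T.Perm F := by
    have h1 : (d.keys.filter p).Perm F :=
      ((PySem.List.sorted_perm d.keys (fun x => x) false).filter p).symm
    refine List.Perm.trans ?_ h1
    have hkeys : d.keys = d.items.map (·.1) := rfl
    rw [hkeys, List.filter_map]
    have heq : d.items.filter (fun kv => p kv.1) = d.items.filter (fun kv => 0 < kv.2) := by
      apply List.filter_congr
      intro kv hkv
      have hgd : d.getD kv.1 0 = kv.2 :=
        PySem.Dict.getD_of_mem_items d (by simpa using hkv) hnd 0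
      simp [hpdef, hgd]
    have hcomp : d.items.filter (p ∘ (·.1)) = d.items.filter (fun kv => p kv.1) := rfl
    rw [hcomp, heq]
  -- assemble
  rw [pvBfold]
  rw [pvFirst_eq_head_filter (fun k => 0 < d.getD k 0),
      pvFirst_eq_head_filter (fun k => 0 < d.getD k 0)]
  rw [pvOptMin_fold_eq_min?, pvOptMax_fold_eq_max?]
  rw [List.filter_reverse, List.head?_reverse]
  exact Prod.ext (pvHead_eq_min? F T hperm hFlt) (pvLast_eq_max? F T hperm hFlt)

-- ===== VERDICT (by name: the statement is the Claim_ definition above) =====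
theorem pairsHistogramRange_spec : Claim_equal_pairsHistogramRange := by
  intro pairs _
  unfold Spec_pairsHistogramRange
  exact pvMain pairs
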